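-- pv_equiv track=rewrite | github.com/DianaWijaya/data-structures-and-algorithms | projects/dl-distance-z-algorithm/naive_dl_algorithm.py | true_dl_distance_le1_match
-- ===== SOURCE A (Python) =====
-- def true_dl_distance_le1_match(s1, s2):
--     """
--     Returns True if the Damerau-Levenshtein distance between s1 and s2 is ≤ 1.
--     Supports substitution, insertion, deletion, and transposition.
--     """
--     len1, len2 = len(s1), len(s2)
--     if abs(len1 - len2) > 1:
--         return False
--
--     # Exact match
--     if s1 == s2:
--         return True
--
--     # Substitution
--     if len1 == len2:
--         diff = sum(a != b for a, b in zip(s1, s2))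
--         if diff == 1:
--             return True
--         # Transposition
--         for i in range(len1 - 1):
--             if (s1[i] != s2[i] or s1[i+1] != s2[i+1]) and \
--                s1[i] == s2[i+1] and s1[i+1] == s2[i] and s1[:i] == s2[:i] and s1[i+2:] == s2[i+2:]:
--                 return True
--         return False
--
--     # Insertion or Deletion
--     if len1 + 1 == len2:
--         # s1 is missing one char
--         for i in range(len2):
--             if s1 == s2[:i] + s2[i+1:]:
--                 return True
--     elif len1 == len2 + 1:
--         # s2 is missing one char
--         for i in range(len1):
--             if s2 == s1[:i] + s1[i+1:]:
--                 return True
--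
--     return False
-- ===== SOURCE B (Python) =====
-- def _lcp(s1, s2):
--     """Length of the longest common prefix of s1 and s2."""
--     i = 0
--     while i < len(s1) and i < len(s2) and s1[i] == s2[i]:
--         i += 1
--     return i
--
--
-- def true_dl_distance_le1_match(s1, s2):
--     """
--     Returns True if the Damerau-Levenshtein distance between s1 and s2 is ≤ 1.
--     Single scan: locate the common prefix and the common suffix of the
--     remainders, then O(1) case checks for substitution/indel/transposition.
--     """
--     n1, n2 = len(s1), len(s2)
--     if abs(n1 - n2) > 1:
--         return False
--     i = _lcp(s1, s2)
--     j = _lcp(s1[i:][::-1], s2[i:][::-1])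
--     r1 = n1 - i - j
--     r2 = n2 - i - j
--     if r1 <= 1 and r2 <= 1:
--         return True  # equal, one substitution, or one insertion/deletion
--     if r1 == 2 and r2 == 2 and s1[i] == s2[i + 1] and s1[i + 1] == s2[i]:
--         return True  # adjacent transposition
--     return False
-- ===== Notes on version B (the rewrite author's own statement) =====
-- stated objective: faster
-- what changed: Replaces A's quadratic slice-comparison loops (one slice-concatenation equality test per candidate position, plus a full mismatch count) by a single linear scan that finds the common prefix and the common suffix of the remainders, after which substitution/indel/transposition are decided by O(1) arithmetic and two character comparisons.
import Mathlib
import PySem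

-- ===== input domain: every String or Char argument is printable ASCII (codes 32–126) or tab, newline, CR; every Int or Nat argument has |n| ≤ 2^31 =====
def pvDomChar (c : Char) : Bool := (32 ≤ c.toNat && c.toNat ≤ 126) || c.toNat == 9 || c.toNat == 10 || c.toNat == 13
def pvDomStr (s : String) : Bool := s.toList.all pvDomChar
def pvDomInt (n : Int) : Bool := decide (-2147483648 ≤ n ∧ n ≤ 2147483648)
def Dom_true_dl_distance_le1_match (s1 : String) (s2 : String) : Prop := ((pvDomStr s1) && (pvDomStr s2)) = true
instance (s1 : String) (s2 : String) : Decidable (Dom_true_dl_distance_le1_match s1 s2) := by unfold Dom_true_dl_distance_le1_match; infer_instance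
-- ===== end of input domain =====

-- B replaces A's quadratic slice-comparison loops by one linear prefix/suffix scan
-- followed by O(1) case checks; equivalence is proved on all inputs (both are total).

-- ===== PORT A =====
-- sum(a != b for a, b in zip(s1, s2))
def diffCount (l1 l2 : List Char) : Nat :=
  (l1.zip l2).foldl (fun acc ab => acc + (if ab.1 ≠ ab.2 then 1 else 0)) 0

-- the condition tested for each i in A's transposition loop
-- (indices i, i+1 are always in range there, so getD is exact; slices with
-- nonnegative bounds are take/drop, exact)
def transCond (l1 l2 : List Char) (i : Nat) : Bool :=
  (decide (l1.getD i ' ' ≠ l2.getD i ' ') || decide (l1.getD (i+1) ' ' ≠ l2.getD (i+1) ' '))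
  && decide (l1.getD i ' ' = l2.getD (i+1) ' ')
  && decide (l1.getD (i+1) ' ' = l2.getD i ' ')
  && decide (l1.take i = l2.take i)
  && decide (l1.drop (i+2) = l2.drop (i+2))

-- literal transliteration of A on the character lists; Python's range(n) over
-- nonnegative n is List.range n, early-returning for-loops are List.any
def aCore (l1 l2 : List Char) : Bool :=
  if ((l1.length : Int) - l2.length).natAbs > 1 then false
  else if l1 = l2 then true
  else if l1.length = l2.length then
    if diffCount l1 l2 = 1 then true
    else (List.range (l1.length - 1)).any (transCond l1 l2)
  else if l1.length + 1 = l2.length then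
    (List.range l2.length).any (fun i => decide (l1 = l2.take i ++ l2.drop (i+1)))
  else if l1.length = l2.length + 1 then
    (List.range l1.length).any (fun i => decide (l2 = l1.take i ++ l1.drop (i+1)))
  else false

def true_dl_distance_le1_match (s1 : String) (s2 : String) : Bool :=
  aCore s1.toList s2.toList

-- ===== PORT B =====
-- _lcp: while loop advancing over equal characters = structural recursion
def lcpLen : List Char → List Char → Nat
  | a::t1, b::t2 => if a = b then lcpLen t1 t2 + 1 else 0
  | _, _ => 0

-- literal transliteration of Source B: s[i:][::-1] is (drop i).reverse
def bCore (l1 l2 : List Char) : Bool :=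
  let n1 := l1.length
  let n2 := l2.length
  if ((n1 : Int) - n2).natAbs > 1 then false
  else
    let i := lcpLen l1 l2
    let j := lcpLen (l1.drop i).reverse (l2.drop i).reverse
    let r1 := n1 - i - j
    let r2 := n2 - i - j
    if r1 ≤ 1 ∧ r2 ≤ 1 then true
    else if r1 = 2 ∧ r2 = 2 ∧ l1.getD i ' ' = l2.getD (i+1) ' ' ∧ l1.getD (i+1) ' ' = l2.getD i ' '
      then true
    else false

def true_dl_distance_le1_match_alt (s1 : String) (s2 : String) : Bool :=
  bCore s1.toList s2.toList

-- ===== PRECONDITION & SPEC =====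
def Spec_true_dl_distance_le1_match (s1 : String) (s2 : String) (out : Bool) : Prop := out = true_dl_distance_le1_match_alt s1 s2
instance (s1 : String) (s2 : String) (out : Bool) : Decidable (Spec_true_dl_distance_le1_match s1 s2 out) := by unfold Spec_true_dl_distance_le1_match; infer_instance

-- ===== CLAIM (what is proved, stated in full; the proofs are below) =====
def Claim_equal_true_dl_distance_le1_match : Prop := ∀ (s1 : String) (s2 : String), Dom_true_dl_distance_le1_match s1 s2 → Spec_true_dl_distance_le1_match s1 s2 (true_dl_distance_le1_match s1 s2)

-- ===== LEMMAS AND PROOFS =====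

theorem le_lcpLen_iff : ∀ (k : Nat) (x y : List Char),
    k ≤ lcpLen x y ↔ (k ≤ x.length ∧ k ≤ y.length ∧ x.take k = y.take k) := by
  intro k
  induction k with
  | zero => intro x y; simp
  | succ k ih =>
    intro x y
    cases x with
    | nil => simp [lcpLen]
    | cons a t1 =>
      cases y with
      | nil => simp [lcpLen]
      | cons b t2 =>
        simp only [lcpLen, List.length_cons, List.take_succ_cons]
        by_cases h : a = b
        · subst h
          rw [if_pos rfl]
          constructor
          · intro hk
            have := (ih t1 t2).mp (by omega)
            exact ⟨by omega, by omega, by simp [this.2.2]⟩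
          · intro ⟨h1, h2, h3⟩
            have h3' := List.cons.injEq .. ▸ h3
            have := (ih t1 t2).mpr ⟨by omega, by omega, (List.cons.inj h3).2⟩
            omega
        · rw [if_neg h]
          constructor
          · omega
          · intro ⟨_, _, h3⟩
            exact absurd (List.cons.inj h3).1 h

theorem le_lcs_iff (k : Nat) (x y : List Char) :
    k ≤ lcpLen x.reverse y.reverse ↔
      (k ≤ x.length ∧ k ≤ y.length ∧ x.drop (x.length - k) = y.drop (y.length - k)) := by
  rw [le_lcpLen_iff, List.length_reverse, List.length_reverse,
      List.take_reverse, List.take_reverse, List.reverse_inj]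

theorem diffCount_foldl_init (l : List (Char × Char)) (n : Nat) :
    l.foldl (fun acc ab => acc + (if ab.1 ≠ ab.2 then 1 else 0)) n
      = n + l.foldl (fun acc ab => acc + (if ab.1 ≠ ab.2 then 1 else 0)) 0 := by
  induction l generalizing n with
  | nil => simp
  | cons hd tl ih => simp only [List.foldl_cons]; rw [ih, ih (0 + _)]; omega

theorem diff_cons (a b : Char) (t1 t2 : List Char) :
    diffCount (a::t1) (b::t2) = (if a = b then 0 else 1) + diffCount t1 t2 := by
  unfold diffCount
  simp only [List.zip_cons_cons, List.foldl_cons]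
  rw [diffCount_foldl_init]
  by_cases h : a = b <;> simp [h]

theorem diff_zero_iff : ∀ (t1 t2 : List Char), t1.length = t2.length →
    (diffCount t1 t2 = 0 ↔ t1 = t2) := by
  intro t1
  induction t1 with
  | nil => intro t2 h; cases t2 with
    | nil => simp [diffCount]
    | cons b s => simp at h
  | cons a s ih =>
    intro t2 h
    cases t2 with
    | nil => simp at h
    | cons b s2 =>
      rw [diff_cons]
      by_cases hab : a = b
      · subst hab
        rw [if_pos rfl, Nat.zero_add]
        simp only [List.cons.injEq, true_and]
        exact ih s2 (by simpa using h)
      · simp [hab]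

theorem bCore_strip (c : Char) (t1 t2 : List Char) : bCore (c::t1) (c::t2) = bCore t1 t2 := by
  simp [bCore, lcpLen, Nat.succ_sub_succ]

theorem transCond_cons_zero (c : Char) (t1 t2 : List Char) :
    transCond (c::t1) (c::t2) 0 = false := by
  by_cases h1 : c = t2[0]?.getD ' ' <;> by_cases h2 : t1[0]?.getD ' ' = c <;>
    simp [transCond, List.getD, h1, h2]

theorem transCond_cons_succ (c : Char) (t1 t2 : List Char) (k : Nat) :
    transCond (c::t1) (c::t2) (k+1) = transCond t1 t2 k := by
  simp only [transCond, List.take_succ_cons, List.drop_succ_cons, List.getD_cons_succ,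
    List.cons.injEq, true_and]
  rfl

theorem anyTrans_strip (c : Char) (t1 t2 : List Char) :
    (List.range t1.length).any (transCond (c::t1) (c::t2))
      = (List.range (t1.length - 1)).any (transCond t1 t2) := by
  cases t1 with
  | nil => simp
  | cons d s =>
    rw [show (d::s).length = s.length + 1 from rfl, List.range_succ_eq_map]
    simp only [List.any_cons, List.any_map, transCond_cons_zero, Bool.false_or,
      Nat.add_sub_cancel]
    exact List.any_congr rfl (fun k => transCond_cons_succ c (d::s) t2 k)

theorem indel_strip (c : Char) (t1 t2 : List Char) :
    (List.range (t2.length + 1)).any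
        (fun k => decide ((c::t1) = (c::t2).take k ++ (c::t2).drop (k+1)))
      = (List.range t2.length).any (fun k => decide (t1 = t2.take k ++ t2.drop (k+1))) := by
  rw [List.range_succ_eq_map]
  simp only [List.any_cons, List.any_map, Function.comp_def, List.take_succ_cons,
    List.drop_succ_cons, List.take_zero, List.drop_zero, List.nil_append]
  rw [Bool.eq_iff_iff]
  simp only [Bool.or_eq_true, List.any_eq_true, List.mem_range, decide_eq_true_eq,
    List.cons_append, List.cons.injEq, true_and, Nat.succ_eq_add_one]
  constructor
  · rintro (hc | ⟨x, hx, hh⟩)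
    · refine ⟨0, ?_, ?_⟩
      · rw [← hc]; simp
      · rw [← hc]; simp
    · exact ⟨x, hx, hh⟩
  · rintro ⟨k, hk, hh⟩
    exact Or.inr ⟨k, hk, hh⟩

theorem aCore_strip (c : Char) (t1 t2 : List Char) : aCore (c::t1) (c::t2) = aCore t1 t2 := by
  have hg : (((t1.length + 1 : Nat) : Int) - ((t2.length + 1 : Nat) : Int)).natAbs
      = ((t1.length : Int) - (t2.length : Int)).natAbs := by
    congr 1
    push_cast
    ring
  simp only [aCore, List.length_cons, List.cons.injEq, true_and, add_left_inj, diff_cons,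
    if_true, Nat.zero_add, Nat.add_sub_cancel]
  rw [hg, anyTrans_strip c t1 t2, indel_strip c t1 t2, indel_strip c t2 t1]

theorem transCond_succ_ne (a b : Char) (t1 t2 : List Char) (h : a ≠ b) (k : Nat) :
    transCond (a::t1) (b::t2) (k+1) = false := by
  simp [transCond, List.take_succ_cons, h]

theorem transCond_zero_ne (a b : Char) (t1 t2 : List Char) (h : a ≠ b) :
    transCond (a::t1) (b::t2) 0 = true ↔
      (a = t2.getD 0 ' ' ∧ t1.getD 0 ' ' = b ∧ t1.drop 1 = t2.drop 1) := by
  simp only [transCond, List.getD_cons_zero, List.getD_cons_succ, List.take_zero,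
    List.drop_succ_cons, List.drop_one]
  simp [h, List.getD]
  tauto

theorem base_ne (a b : Char) (t1 t2 : List Char) (h : a ≠ b) :
    aCore (a::t1) (b::t2) = bCore (a::t1) (b::t2) := by
  have hxy : ¬ (a::t1 = b::t2) := by simp [h]
  have i0 : lcpLen (a::t1) (b::t2) = 0 := by simp [lcpLen, h]
  rw [Bool.eq_iff_iff]
  simp only [aCore, bCore, i0, List.drop_zero, List.length_cons, if_neg hxy,
    Nat.add_sub_cancel, Nat.sub_zero, List.getD_cons_zero, List.getD_cons_succ]
  set j := lcpLen (a::t1).reverse (b::t2).reverse with hjdef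
  have hlcs : ∀ k : Nat, k ≤ j ↔ (k ≤ t1.length + 1 ∧ k ≤ t2.length + 1 ∧
      (a::t1).drop (t1.length + 1 - k) = (b::t2).drop (t2.length + 1 - k)) := by
    intro k
    rw [hjdef]
    simpa using le_lcs_iff k (a::t1) (b::t2)
  have hj1 : j ≤ t1.length + 1 := by
    by_contra hh
    have := (hlcs (t1.length + 2)).mp (by omega)
    omega
  have hj2 : j ≤ t2.length + 1 := by
    by_contra hh
    have := (hlcs (t2.length + 2)).mp (by omega)
    omega
  by_cases hg : (((t1.length + 1 : Nat) : Int) - ((t2.length + 1 : Nat) : Int)).natAbs > 1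
  · rw [if_pos hg, if_pos hg]
  · rw [if_neg hg, if_neg hg]
    have htri : t1.length = t2.length ∨ t1.length + 1 = t2.length ∨ t1.length = t2.length + 1 := by
      omega
    rcases htri with heq | hlt | hgt
    · -- equal lengths
      have hjne : ¬ (t1.length + 1 ≤ j) := by
        intro hle
        rcases (hlcs (t1.length + 1)).mp hle with ⟨-, -, hd⟩
        rw [Nat.sub_self, show t2.length + 1 - (t1.length + 1) = 0 by omega] at hd
        simp only [List.drop_zero] at hd
        exact hxy hd
      have hc1 : t1.length + 1 - j ≤ 1 ↔ t1 = t2 := by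
        constructor
        · intro hle
          have hjn : t1.length ≤ j := by omega
          rcases (hlcs t1.length).mp hjn with ⟨-, -, hd⟩
          rw [show t1.length + 1 - t1.length = 1 by omega,
              show t2.length + 1 - t1.length = 1 by omega] at hd
          simpa using hd
        · intro ht
          have : t1.length ≤ j := (hlcs t1.length).mpr
            ⟨by omega, by omega,
             by rw [show t1.length + 1 - t1.length = 1 by omega,
                    show t2.length + 1 - t1.length = 1 by omega]; simpa using ht⟩
          omega
      have hdiff : diffCount (a::t1) (b::t2) = 1 ↔ t1 = t2 := by
        rw [diff_cons, if_neg h]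
        constructor
        · intro hd
          exact (diff_zero_iff t1 t2 heq).mp (by omega)
        · intro ht
          rw [(diff_zero_iff t1 t2 heq).mpr ht]
      rw [if_pos (by omega : t1.length + 1 = t2.length + 1)]
      by_cases ht : t1 = t2
      · have hcc := hc1.mpr ht
        rw [if_pos (hdiff.mpr ht), if_pos ⟨hcc, by omega⟩]
      · rw [if_neg (fun hd => ht (hdiff.mp hd)),
            if_neg (fun hc => ht (hc1.mp hc.1))]
        constructor
        · intro hany
          rcases List.any_eq_true.mp hany with ⟨k, hk, hcond⟩
          rw [List.mem_range] at hk
          cases k with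
          | succ k' => rw [transCond_succ_ne a b t1 t2 h k'] at hcond; exact absurd hcond (by simp)
          | zero =>
            rcases (transCond_zero_ne a b t1 t2 h).mp hcond with ⟨hs1, hs2, hdr⟩
            have hjge : t1.length - 1 ≤ j := (hlcs (t1.length - 1)).mpr
              ⟨by omega, by omega,
               by rw [show t1.length + 1 - (t1.length - 1) = 2 by omega,
                      show t2.length + 1 - (t1.length - 1) = 2 by omega]
                  simpa using hdr⟩
            have hjle : ¬ (t1.length ≤ j) := by
              intro hle
              rcases (hlcs t1.length).mp hle with ⟨-, -, hd⟩
              rw [show t1.length + 1 - t1.length = 1 by omega,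
                  show t2.length + 1 - t1.length = 1 by omega] at hd
              simp only [List.drop_one, List.tail_cons] at hd
              exact ht (by simpa using hd)
            rw [if_pos ⟨by omega, by omega, hs1, hs2⟩]
        · intro hif
          by_cases hcnd : t1.length + 1 - j = 2 ∧ t2.length + 1 - j = 2 ∧
              a = t2.getD 0 ' ' ∧ t1.getD 0 ' ' = b
          · rcases hcnd with ⟨hr1, hr2, hs1, hs2⟩
            have hjv : j = t1.length - 1 := by omega
            have hn1 : 1 ≤ t1.length := by omega
            rcases (hlcs (t1.length - 1)).mp (by omega) with ⟨-, -, hd⟩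
            rw [show t1.length + 1 - (t1.length - 1) = 2 by omega,
                show t2.length + 1 - (t1.length - 1) = 2 by omega] at hd
            apply List.any_eq_true.mpr
            refine ⟨0, List.mem_range.mpr (by omega), ?_⟩
            exact (transCond_zero_ne a b t1 t2 h).mpr ⟨hs1, hs2, by simpa using hd⟩
          · rw [if_neg hcnd] at hif
            exact absurd hif (by simp)
    · -- insertion: len(s1)+1 = len(s2)
      have hA : (List.range (t2.length + 1)).any
          (fun i => decide (a::t1 = (b::t2).take i ++ (b::t2).drop (i+1))) = true ↔
          a::t1 = t2 := by
        constructor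
        · intro hany
          rcases List.any_eq_true.mp hany with ⟨k, -, hcond⟩
          rw [decide_eq_true_eq] at hcond
          cases k with
          | zero => simpa using hcond
          | succ k' =>
            rw [List.take_succ_cons, List.drop_succ_cons] at hcond
            exact absurd (List.cons.inj hcond).1 h
        · intro hc
          apply List.any_eq_true.mpr
          exact ⟨0, List.mem_range.mpr (by omega), by simpa using hc⟩
      have hB : t1.length + 1 ≤ j ↔ a::t1 = t2 := by
        rw [hlcs (t1.length + 1)]
        rw [Nat.sub_self, show t2.length + 1 - (t1.length + 1) = 1 by omega]
        simp only [List.drop_zero, List.drop_one, List.tail_cons]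
        constructor
        · rintro ⟨-, -, hd⟩; exact hd
        · intro hd; exact ⟨by omega, by omega, hd⟩
      rw [if_neg (by omega : ¬ (t1.length + 1 = t2.length + 1)),
          if_pos (by omega : t1.length + 1 + 1 = t2.length + 1)]
      by_cases hc : a::t1 = t2
      · rw [if_pos (⟨by have := hB.mpr hc; omega, by have := hB.mpr hc; omega⟩ :
          t1.length + 1 - j ≤ 1 ∧ t2.length + 1 - j ≤ 1)]
        rw [hA]
        simp [hc]
      · rw [if_neg (fun hcc => hc (hB.mp (by omega : t1.length + 1 ≤ j))),
            if_neg (by omega : ¬ (t1.length + 1 - j = 2 ∧ t2.length + 1 - j = 2 ∧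
              a = t2.getD 0 ' ' ∧ t1.getD 0 ' ' = b))]
        rw [hA]
        simp [hc]
    · -- deletion: len(s1) = len(s2)+1
      have hA : (List.range (t1.length + 1)).any
          (fun i => decide (b::t2 = (a::t1).take i ++ (a::t1).drop (i+1))) = true ↔
          b::t2 = t1 := by
        constructor
        · intro hany
          rcases List.any_eq_true.mp hany with ⟨k, -, hcond⟩
          rw [decide_eq_true_eq] at hcond
          cases k with
          | zero => simpa using hcond
          | succ k' =>
            rw [List.take_succ_cons, List.drop_succ_cons] at hcond
            exact absurd (List.cons.inj hcond).1 h.symm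
        · intro hc
          apply List.any_eq_true.mpr
          exact ⟨0, List.mem_range.mpr (by omega), by simpa using hc⟩
      have hB : t2.length + 1 ≤ j ↔ t1 = b::t2 := by
        rw [hlcs (t2.length + 1)]
        rw [Nat.sub_self, show t1.length + 1 - (t2.length + 1) = 1 by omega]
        simp only [List.drop_zero, List.drop_one, List.tail_cons]
        constructor
        · rintro ⟨-, -, hd⟩; exact hd
        · intro hd; exact ⟨by omega, by omega, hd⟩
      rw [if_neg (by omega : ¬ (t1.length + 1 = t2.length + 1)),
          if_neg (by omega : ¬ (t1.length + 1 + 1 = t2.length + 1)),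
          if_pos (by omega : t1.length + 1 = t2.length + 1 + 1)]
      by_cases hc : t1 = b::t2
      · rw [if_pos (⟨by have := hB.mpr hc; omega, by have := hB.mpr hc; omega⟩ :
          t1.length + 1 - j ≤ 1 ∧ t2.length + 1 - j ≤ 1)]
        rw [hA]
        simp [hc]
      · rw [if_neg (fun hcc => hc (hB.mp (by omega : t2.length + 1 ≤ j))),
            if_neg (by omega : ¬ (t1.length + 1 - j = 2 ∧ t2.length + 1 - j = 2 ∧
              a = t2.getD 0 ' ' ∧ t1.getD 0 ' ' = b))]
        rw [hA]
        constructor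
        · intro hcc; exact absurd hcc.symm hc
        · intro hcc; exact absurd hcc (by simp)

theorem core_eq : ∀ (l1 l2 : List Char), aCore l1 l2 = bCore l1 l2 := by
  intro l1
  induction l1 with
  | nil =>
    intro l2
    cases l2 with
    | nil => rfl
    | cons b t2 =>
      cases t2 with
      | nil => rfl
      | cons c t3 =>
        simp [aCore, bCore]
        omega
  | cons a t1 ih =>
    intro l2
    cases l2 with
    | nil =>
      cases t1 with
      | nil => rfl
      | cons c t3 =>
        simp [aCore, bCore]
        omega
    | cons b t2 =>
      by_cases h : a = b
      · subst h
        rw [aCore_strip, bCore_strip]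
        exact ih t2
      · exact base_ne a b t1 t2 h

-- ===== VERDICT (by name: the statement is the Claim_ definition above) =====
theorem true_dl_distance_le1_match_spec : Claim_equal_true_dl_distance_le1_match := by
  intro s1 s2 _
  unfold Spec_true_dl_distance_le1_match true_dl_distance_le1_match true_dl_distance_le1_match_alt
  exact core_eq s1.toList s2.toList
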